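-- pv_equiv track=rewrite | github.com/asmmartin/advent-of-code-23-public | src/advent_of_code_23/day07.py | hand_cmp_by_first_difference
-- ===== SOURCE A (Python) =====
-- CARD_VALUES = dict(zip('AKQJT98765432', range(14, 1, -1)))
--
-- def get_card_value(card: str, j_is_lowest: bool = False) -> int:
--     value = CARD_VALUES.get(card, 0)
--     if j_is_lowest and card == 'J':
--         value = 1
--     return value
--
-- def hand_cmp_by_first_difference(
--     first: str,
--     second: str,
--     j_is_lowest: bool = False
-- ) -> int:
--     for cards in zip(first, second):
--         values = (
--             get_card_value(cards[0], j_is_lowest),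
--             get_card_value(cards[1], j_is_lowest)
--         )
--         if values[0] < values[1]:
--             return -1
--         if values[0] > values[1]:
--             return 1
--     return 0
-- ===== SOURCE B (Python) =====
-- CARD_VALUES = dict(zip('AKQJT98765432', range(14, 1, -1)))
--
--
-- def get_card_value(card: str, j_is_lowest: bool = False) -> int:
--     value = CARD_VALUES.get(card, 0)
--     if j_is_lowest and card == 'J':
--         value = 1
--     return value
--
--
-- def hand_cmp_by_first_difference(
--     first: str,
--     second: str,
--     j_is_lowest: bool = False
-- ) -> int:
--     pairs = list(zip(first, second))
--     va = [get_card_value(a, j_is_lowest) for a, _ in pairs]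
--     vb = [get_card_value(b, j_is_lowest) for _, b in pairs]
--     return (va > vb) - (va < vb)
-- ===== Notes on version B (the rewrite author's own statement) =====
-- stated objective: idiomatic
-- what changed: Replaces A's explicit card-by-card compare-and-return loop with building the two value lists once and returning the three-way result (va > vb) - (va < vb) of Python's native lexicographic list comparison.
import Mathlib
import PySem

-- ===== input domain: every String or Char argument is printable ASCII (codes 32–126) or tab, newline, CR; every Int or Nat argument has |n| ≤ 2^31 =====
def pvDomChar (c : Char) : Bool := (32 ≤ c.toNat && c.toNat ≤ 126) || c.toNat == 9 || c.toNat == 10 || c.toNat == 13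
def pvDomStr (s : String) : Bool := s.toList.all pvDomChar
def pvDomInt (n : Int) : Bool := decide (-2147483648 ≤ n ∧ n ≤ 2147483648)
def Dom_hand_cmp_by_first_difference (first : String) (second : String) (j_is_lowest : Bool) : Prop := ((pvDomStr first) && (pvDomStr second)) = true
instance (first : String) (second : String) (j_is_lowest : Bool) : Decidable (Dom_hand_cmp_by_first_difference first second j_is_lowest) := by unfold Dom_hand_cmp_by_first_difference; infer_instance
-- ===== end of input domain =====

-- B replaces A's explicit compare-and-return loop by building the two value lists once and
-- returning the three-way result of one native lexicographic list comparison (idiomatic, same cost).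

-- ===== PORT A =====
def CARD_VALUES : PySem.Dict Char Int :=
  PySem.Dict.ofList (List.zip "AKQJT98765432".toList (PySem.List.pyRange 14 1 (-1)))

def get_card_value (card : Char) (j_is_lowest : Bool) : Int :=
  let value := CARD_VALUES.getD card 0
  if j_is_lowest && card == 'J' then 1 else value

-- A's for-loop over zip(first, second) with early return, as structural recursion
def handCmpLoopA (j : Bool) : List (Char × Char) → Int
  | [] => 0
  | cards :: rest =>
    let va := get_card_value cards.1 j
    let vb := get_card_value cards.2 j
    if va < vb then -1
    else if va > vb then 1
    else handCmpLoopA j rest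

def hand_cmp_by_first_difference (first : String) (second : String) (j_is_lowest : Bool) : Int :=
  handCmpLoopA j_is_lowest (first.toList.zip second.toList)

-- ===== PORT B =====
-- Python's lexicographic '<' on lists of ints
def pyListLt : List Int → List Int → Bool
  | [], [] => false
  | [], _ :: _ => true
  | _ :: _, [] => false
  | a :: as, b :: bs => a < b || (a == b && pyListLt as bs)

def hand_cmp_by_first_difference_alt (first : String) (second : String) (j_is_lowest : Bool) : Int :=
  let pairs := first.toList.zip second.toList
  let va := pairs.map (fun p => get_card_value p.1 j_is_lowest)
  let vb := pairs.map (fun p => get_card_value p.2 j_is_lowest)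
  (if pyListLt vb va then (1 : Int) else 0) - (if pyListLt va vb then 1 else 0)

-- ===== PRECONDITION & SPEC =====
def Spec_hand_cmp_by_first_difference (first : String) (second : String) (j_is_lowest : Bool) (out : Int) : Prop := out = hand_cmp_by_first_difference_alt first second j_is_lowest
instance (first : String) (second : String) (j_is_lowest : Bool) (out : Int) : Decidable (Spec_hand_cmp_by_first_difference first second j_is_lowest out) := by unfold Spec_hand_cmp_by_first_difference; infer_instance

-- ===== CLAIM (what is proved, stated in full; the proofs are below) =====
def Claim_equal_hand_cmp_by_first_difference : Prop := ∀ (first : String) (second : String) (j_is_lowest : Bool), Dom_hand_cmp_by_first_difference first second j_is_lowest → Spec_hand_cmp_by_first_difference first second j_is_lowest (hand_cmp_by_first_difference first second j_is_lowest)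

-- ===== LEMMAS AND PROOFS =====
lemma handCmp_loop_eq (j : Bool) (pairs : List (Char × Char)) :
    handCmpLoopA j pairs =
      (if pyListLt (pairs.map (fun p => get_card_value p.2 j)) (pairs.map (fun p => get_card_value p.1 j)) then (1 : Int) else 0) -
      (if pyListLt (pairs.map (fun p => get_card_value p.1 j)) (pairs.map (fun p => get_card_value p.2 j)) then 1 else 0) := by
  induction pairs with
  | nil => simp [handCmpLoopA, pyListLt]
  | cons hd tl ih =>
    simp only [handCmpLoopA, List.map_cons, pyListLt, ih]
    by_cases hab : pyListLt (List.map (fun p => get_card_value p.1 j) tl)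
        (List.map (fun p => get_card_value p.2 j) tl) = true <;>
      by_cases hba : pyListLt (List.map (fun p => get_card_value p.2 j) tl)
          (List.map (fun p => get_card_value p.1 j) tl) = true <;>
        (try simp [hab, hba]) <;> split_ifs <;> omega

-- ===== VERDICT (by name: the statement is the Claim_ definition above) =====
theorem hand_cmp_by_first_difference_spec : Claim_equal_hand_cmp_by_first_difference := by
  intro first second j _
  unfold Spec_hand_cmp_by_first_difference hand_cmp_by_first_difference hand_cmp_by_first_difference_alt
  exact handCmp_loop_eq j (first.toList.zip second.toList)
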